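-- pv_equiv track=rewrite | github.com/Antoniogm0898/Compiladores----- | Managers/memManager.py | generaMemoria
-- ===== SOURCE A (Python) =====
-- def generaMemoria(inputs):
--     if inputs == []:
--         # Memoria estandar
--         return [0, 1000, 2000, 3000, 4000, 5000, 6000, 7000, 8000, 9000, 10000, 11000, 12000, 13000, 14000, 15000]
--     else:
--         memory = [0]
--         for memorySize in inputs:
--             memory.append(memorySize + memory[-1])
--         return memory
-- ===== SOURCE B (Python) =====
-- def generaMemoria(inputs):
--     if inputs == []:
--         return [0, 1000, 2000, 3000, 4000, 5000, 6000, 7000, 8000, 9000, 10000, 11000, 12000, 13000, 14000, 15000]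
--     else:
--         return [0] + [sum(inputs[:i + 1]) for i in range(len(inputs))]
-- ===== Notes on version B (the rewrite author's own statement) =====
-- stated objective: alternative
-- what changed: Replaces A's single accumulating loop (append size plus last element) with an index comprehension that computes each offset independently as the sum of the first i+1 sizes via slicing, trading the running accumulator for repeated prefix scans.
import Mathlib
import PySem

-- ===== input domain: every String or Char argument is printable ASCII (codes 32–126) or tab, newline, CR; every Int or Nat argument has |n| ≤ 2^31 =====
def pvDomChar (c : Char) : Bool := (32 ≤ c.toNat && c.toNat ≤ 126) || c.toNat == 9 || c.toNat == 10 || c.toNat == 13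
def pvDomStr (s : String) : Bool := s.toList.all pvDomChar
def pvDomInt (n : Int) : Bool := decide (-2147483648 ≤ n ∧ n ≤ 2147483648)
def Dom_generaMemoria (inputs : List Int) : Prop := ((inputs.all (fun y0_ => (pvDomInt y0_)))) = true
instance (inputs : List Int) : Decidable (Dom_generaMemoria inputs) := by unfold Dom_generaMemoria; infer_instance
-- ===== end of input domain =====

-- B replaces A's accumulating append loop by an index comprehension computing each offset
-- independently as the sum of a prefix slice; same values, no speed claim (B is quadratic).

-- ===== PORT A =====
-- memory.append(memorySize plus memory's last element); memory is always nonempty (starts as a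
-- singleton zero), so Python's negative-one index never raises; the 0 default of pyGetD is never taken.
def generaMemoriaStep (memory : List Int) (memorySize : Int) : List Int :=
  memory ++ [memorySize + PySem.List.pyGetD memory (-1) 0]

def generaMemoria (inputs : List Int) : List Int :=
  if inputs == [] then
    [0, 1000, 2000, 3000, 4000, 5000, 6000, 7000, 8000, 9000, 10000, 11000, 12000, 13000, 14000, 15000]
  else
    inputs.foldl generaMemoriaStep [0]

-- ===== PORT B =====
-- [0] + [sum(inputs[:i+1]) for i in range(len(inputs))]
def generaMemoria_alt (inputs : List Int) : List Int :=
  if inputs == [] then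
    [0, 1000, 2000, 3000, 4000, 5000, 6000, 7000, 8000, 9000, 10000, 11000, 12000, 13000, 14000, 15000]
  else
    [0] ++ (PySem.List.pyRange 0 inputs.length 1).map
      (fun i => (PySem.List.slice inputs none (some (i + 1))).sum)

-- ===== PRECONDITION & SPEC =====
def Spec_generaMemoria (inputs : List Int) (out : List Int) : Prop := out = generaMemoria_alt inputs
instance (inputs : List Int) (out : List Int) : Decidable (Spec_generaMemoria inputs out) := by unfold Spec_generaMemoria; infer_instance

-- ===== CLAIM (what is proved, stated in full; the proofs are below) =====
def Claim_equal_generaMemoria : Prop := ∀ (inputs : List Int), Dom_generaMemoria inputs → Spec_generaMemoria inputs (generaMemoria inputs)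

-- ===== LEMMAS AND PROOFS =====

theorem pyGetD_append_last (m : List Int) (v : Int) :
    PySem.List.pyGetD (m ++ [v]) (-1) 0 = v := by
  simp [PySem.List.pyGetD, PySem.List.pyGet?, PySem.List.pyIdx?]

-- A's loop: appending running sums; index i of the appended block is sum of the first i+1 sizes.
theorem foldl_step_prefix (l : List Int) (acc : List Int) (t : Int)
    (h : PySem.List.pyGetD acc (-1) 0 = t) :
    l.foldl generaMemoriaStep acc
      = acc ++ (List.range l.length).map (fun i => t + (l.take (i + 1)).sum) := by
  induction l generalizing acc t with
  | nil => simp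
  | cons x xs ih =>
    rw [List.foldl_cons]
    have hstep : generaMemoriaStep acc x = acc ++ [x + t] := by
      simp [generaMemoriaStep, h]
    rw [hstep, ih (acc ++ [x + t]) (x + t) (pyGetD_append_last acc (x + t))]
    simp [List.range_succ_eq_map, List.map_map, List.take_succ_cons, Function.comp]
    constructor
    · ring
    · intro i _
      ring

-- ===== VERDICT (by name: the statement is the Claim_ definition above) =====
theorem generaMemoria_spec : Claim_equal_generaMemoria := by
  intro inputs _
  unfold Spec_generaMemoria generaMemoria generaMemoria_alt
  by_cases hne : inputs = []
  · simp [hne]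
  · simp only [beq_iff_eq, hne, if_false]
    rw [foldl_step_prefix inputs [0] 0 rfl, PySem.List.pyRange_one]
    simp only [List.map_map, sub_zero, Int.toNat_natCast]
    congr 1
    apply List.map_congr_left
    intro k _
    simp only [Function.comp, zero_add]
    rw [show ((k : Int) + 1) = ((k + 1 : ℕ) : Int) from by push_cast; ring,
      PySem.List.slice_to_natCast]
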